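-- pv_equiv track=rewrite | github.com/AlexanderBedrosyan/Programming-Fundamentals-with-Python | Lists Advanced - More Exercises/take_skip_rope_2.py | find_the_message
-- ===== SOURCE A (Python) =====
-- def find_the_message(current_message, take_list, skip_list):
--     final_message = ''
--     string_message = ''.join(current_message)
--     for i in range(len(take_list)):
--         if take_list[i] > 0:
--             final_message += string_message[0:take_list[i]]
--             string_message = string_message[take_list[i]:]
--         if skip_list[i] > 0:
--             string_message = string_message[skip_list[i]:]
--     return final_message
-- ===== SOURCE B (Python) =====
-- def find_the_message(current_message, take_list, skip_list):
--     s = ''.join(current_message)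
--     bounds = []
--     pos = 0
--     for t, k in zip(take_list, skip_list):
--         if t > 0:
--             bounds.append((pos, pos + t))
--         pos += max(t, 0) + max(k, 0)
--     return ''.join(s[a:b] for a, b in bounds)
-- ===== Notes on version B (the rewrite author's own statement) =====
-- stated objective: alternative
-- what changed: B first computes the (start, stop) bounds of every taken piece by a pure-arithmetic scan over the zipped take/skip pairs (one combined position advance per step, no slicing in the loop), then slices the joined string once per bound and joins the pieces, instead of A's range-index loop that re-slices the remaining string twice per iteration and grows an accumulator string.
import Mathlib
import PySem

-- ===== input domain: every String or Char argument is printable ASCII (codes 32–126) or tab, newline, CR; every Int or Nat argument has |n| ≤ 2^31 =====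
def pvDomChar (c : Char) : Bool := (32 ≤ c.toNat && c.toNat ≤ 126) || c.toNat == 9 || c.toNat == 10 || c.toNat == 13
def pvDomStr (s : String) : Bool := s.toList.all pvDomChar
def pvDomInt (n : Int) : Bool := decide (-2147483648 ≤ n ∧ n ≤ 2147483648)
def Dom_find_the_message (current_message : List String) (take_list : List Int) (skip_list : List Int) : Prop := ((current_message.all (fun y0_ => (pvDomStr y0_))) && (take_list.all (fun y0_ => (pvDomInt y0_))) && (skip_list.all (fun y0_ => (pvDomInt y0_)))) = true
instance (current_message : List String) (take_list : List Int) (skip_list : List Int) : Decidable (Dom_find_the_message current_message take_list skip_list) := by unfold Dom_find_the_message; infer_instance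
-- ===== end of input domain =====

-- B computes the (start, stop) bounds of the taken pieces by a pure-arithmetic scan over
-- the zipped take/skip pairs, then slices and joins once, instead of A's index loop that
-- re-slices the remaining string twice per step (objective: alternative; not measured faster).

-- ===== PORT A =====
def find_the_message (current_message : List String) (take_list : List Int) (skip_list : List Int) : String :=
  let string_message := PySem.Str.join "" current_message
  let r := (PySem.List.pyRange 0 (take_list.length : Int) 1).foldl
    (fun (st : String × String) i =>
      let st1 := if PySem.List.pyGetD take_list i 0 > 0 then
          (st.1 ++ PySem.Str.slice st.2 (some 0) (some (PySem.List.pyGetD take_list i 0)),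
           PySem.Str.slice st.2 (some (PySem.List.pyGetD take_list i 0)) none)
        else st
      if PySem.List.pyGetD skip_list i 0 > 0 then
          (st1.1, PySem.Str.slice st1.2 (some (PySem.List.pyGetD skip_list i 0)) none)
        else st1)
    ("", string_message)
  r.1

-- ===== PORT B =====
def find_the_message_alt (current_message : List String) (take_list : List Int) (skip_list : List Int) : String :=
  let s := PySem.Str.join "" current_message
  let r := (take_list.zip skip_list).foldl
    (fun (st : List (Int × Int) × Int) tk =>
      ((if tk.1 > 0 then st.1 ++ [(st.2, st.2 + tk.1)] else st.1),
       st.2 + max tk.1 0 + max tk.2 0))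
    ([], 0)
  PySem.Str.join "" (r.1.map (fun ab => PySem.Str.slice s (some ab.1) (some ab.2)))

-- ===== PRECONDITION & SPEC =====
-- Pre_ excludes only inputs where A raises IndexError (skip_list shorter than take_list).
def Pre_find_the_message (current_message : List String) (take_list : List Int) (skip_list : List Int) : Prop :=
  take_list.length ≤ skip_list.length
instance (current_message : List String) (take_list : List Int) (skip_list : List Int) : Decidable (Pre_find_the_message current_message take_list skip_list) := by unfold Pre_find_the_message; infer_instance
def pvWitness_find_the_message : List String × List Int × List Int := (["abc", "de"], [2, 1], [1, 0])

def Spec_find_the_message (current_message : List String) (take_list : List Int) (skip_list : List Int) (out : String) : Prop := out = find_the_message_alt current_message take_list skip_list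
instance (current_message : List String) (take_list : List Int) (skip_list : List Int) (out : String) : Decidable (Spec_find_the_message current_message take_list skip_list out) := by unfold Spec_find_the_message; infer_instance

-- ===== CLAIM (what is proved, stated in full; the proofs are below) =====
def Claim_equal_find_the_message : Prop := ∀ (current_message : List String) (take_list : List Int) (skip_list : List Int), Dom_find_the_message current_message take_list skip_list → Pre_find_the_message current_message take_list skip_list → Spec_find_the_message current_message take_list skip_list (find_the_message current_message take_list skip_list)

-- ===== LEMMAS AND PROOFS =====

theorem pv_fold_range_eq_fold_zip {σ : Type} (f : σ → Int → Int → σ)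
    (tl sl : List Int) (h : tl.length ≤ sl.length) :
    ∀ (m k : Nat) (st : σ), tl.length - k = m → k ≤ tl.length →
      (PySem.List.pyRange (k : Int) (tl.length : Int) 1).foldl
        (fun st i => f st (PySem.List.pyGetD tl i 0) (PySem.List.pyGetD sl i 0)) st
      = ((tl.drop k).zip (sl.drop k)).foldl (fun st p => f st p.1 p.2) st := by
  intro m
  induction m with
  | zero =>
    intro k st hm hk
    have hk' : tl.length ≤ k := by omega
    rw [PySem.List.pyRange_one_eq_nil (by exact_mod_cast hk'),
      List.drop_eq_nil_of_le hk']
    simp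
  | succ m ih =>
    intro k st hm hk
    have hk1 : k < tl.length := by omega
    have hk2 : k < sl.length := by omega
    rw [PySem.List.pyRange_one_cons (by exact_mod_cast hk1), List.foldl_cons,
      List.drop_eq_getElem_cons hk1, List.drop_eq_getElem_cons hk2]
    simp only [List.zip_cons_cons, List.foldl_cons]
    have e1 : PySem.List.pyGetD tl ((k : Nat) : Int) 0 = tl[k] := by
      simp [PySem.List.pyGetD_of_nonneg, hk1]
    have e2 : PySem.List.pyGetD sl ((k : Nat) : Int) 0 = sl[k] := by
      simp [PySem.List.pyGetD_of_nonneg, hk2]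
    rw [e1, e2]
    have : ((k : Int) + 1) = ((k + 1 : Nat) : Int) := by push_cast; ring
    rw [this, ih (k + 1) _ (by omega) (by omega)]

theorem pv_chars_join_append (l : List (List Char)) (x : List Char) :
    PySem.Chars.join [] (l ++ [x]) = PySem.Chars.join [] l ++ x := by
  induction l with
  | nil => simp [PySem.Chars.join_nil, PySem.Chars.join_singleton]
  | cons a l ih =>
    cases l with
    | nil => simp [PySem.Chars.join_singleton, PySem.Chars.join_cons_cons]
    | cons b l' =>
      rw [List.cons_append, PySem.Chars.join_cons_cons, List.cons_append,
        PySem.Chars.join_cons_cons, ← List.cons_append, ih]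
      simp

theorem pv_join_append (parts : List String) (x : String) :
    PySem.Str.join "" (parts ++ [x]) = PySem.Str.join "" parts ++ x := by
  apply String.toList_inj.mp
  simp [PySem.Str.toList_join, pv_chars_join_append]

theorem pv_slice_slice_take (s : String) (pos t : Int) (h0 : 0 ≤ pos) (ht : 0 ≤ t) :
    PySem.Str.slice (PySem.Str.slice s (some pos) none) (some 0) (some t)
      = PySem.Str.slice s (some pos) (some (pos + t)) := by
  apply String.toList_inj.mp
  simp only [PySem.Str.toList_slice, PySem.Chars.slice_eq_listSlice]
  rw [PySem.List.slice_zero_start, PySem.List.slice_from _ h0,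
    PySem.List.slice_to _ ht, PySem.List.slice_toNat _ h0 (by omega : (0:Int) ≤ pos + t)]
  congr 1
  omega

theorem pv_slice_slice_drop (s : String) (pos t : Int) (h0 : 0 ≤ pos) (ht : 0 ≤ t) :
    PySem.Str.slice (PySem.Str.slice s (some pos) none) (some t) none
      = PySem.Str.slice s (some (pos + t)) none := by
  apply String.toList_inj.mp
  simp only [PySem.Str.toList_slice, PySem.Chars.slice_eq_listSlice]
  rw [PySem.List.slice_from _ h0, PySem.List.slice_from _ ht,
    PySem.List.slice_from _ (by omega : (0:Int) ≤ pos + t), List.drop_drop]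
  congr 1
  omega

theorem pv_loop_eq (s : String) (ps : List (Int × Int)) :
    ∀ (bounds : List (Int × Int)) (pos : Int), 0 ≤ pos →
    (ps.foldl
      (fun (st : String × String) p =>
        let st1 := if p.1 > 0 then
            (st.1 ++ PySem.Str.slice st.2 (some 0) (some p.1),
             PySem.Str.slice st.2 (some p.1) none)
          else st
        if p.2 > 0 then (st1.1, PySem.Str.slice st1.2 (some p.2) none) else st1)
      (PySem.Str.join "" (bounds.map (fun ab => PySem.Str.slice s (some ab.1) (some ab.2))),
       PySem.Str.slice s (some pos) none)).1
    = PySem.Str.join ""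
        (((ps.foldl
            (fun (st : List (Int × Int) × Int) tk =>
              ((if tk.1 > 0 then st.1 ++ [(st.2, st.2 + tk.1)] else st.1),
               st.2 + max tk.1 0 + max tk.2 0))
            (bounds, pos)).1).map (fun ab => PySem.Str.slice s (some ab.1) (some ab.2))) := by
  induction ps with
  | nil => simp
  | cons p ps ih =>
    intro bounds pos hpos
    obtain ⟨t, k⟩ := p
    simp only [List.foldl_cons]
    by_cases ht : t > 0 <;> by_cases hk : k > 0 <;>
      simp only [ht, hk, if_pos, if_neg, not_false_iff]
    · have hmax : pos + max t 0 + max k 0 = pos + t + k := by omega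
      rw [pv_slice_slice_take s pos t hpos (le_of_lt ht),
        pv_slice_slice_drop s pos t hpos (le_of_lt ht),
        pv_slice_slice_drop s (pos + t) k (by omega) (le_of_lt hk), hmax]
      have e : PySem.Str.join "" (bounds.map (fun ab => PySem.Str.slice s (some ab.1) (some ab.2)))
            ++ PySem.Str.slice s (some pos) (some (pos + t))
          = PySem.Str.join "" ((bounds ++ [(pos, pos + t)]).map
              (fun ab => PySem.Str.slice s (some ab.1) (some ab.2))) := by
        simp only [List.map_append, List.map_cons, List.map_nil]
        rw [pv_join_append]
      rw [e]
      exact ih (bounds ++ [(pos, pos + t)]) (pos + t + k) (by omega)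
    · have hmax : pos + max t 0 + max k 0 = pos + t := by omega
      rw [pv_slice_slice_take s pos t hpos (le_of_lt ht),
        pv_slice_slice_drop s pos t hpos (le_of_lt ht), hmax]
      have e : PySem.Str.join "" (bounds.map (fun ab => PySem.Str.slice s (some ab.1) (some ab.2)))
            ++ PySem.Str.slice s (some pos) (some (pos + t))
          = PySem.Str.join "" ((bounds ++ [(pos, pos + t)]).map
              (fun ab => PySem.Str.slice s (some ab.1) (some ab.2))) := by
        simp only [List.map_append, List.map_cons, List.map_nil]
        rw [pv_join_append]
      rw [e]
      exact ih (bounds ++ [(pos, pos + t)]) (pos + t) (by omega)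
    · have hmax : pos + max t 0 + max k 0 = pos + k := by omega
      rw [pv_slice_slice_drop s pos k hpos (le_of_lt hk), hmax]
      exact ih bounds (pos + k) (by omega)
    · have hmax : pos + max t 0 + max k 0 = pos := by omega
      rw [hmax]
      exact ih bounds pos hpos

theorem pv_loop_eq' (s : String) (ps : List (Int × Int)) (fm sm : String)
    (h1 : fm = "") (h2 : sm = s) :
    (ps.foldl
      (fun (st : String × String) p =>
        let st1 := if p.1 > 0 then
            (st.1 ++ PySem.Str.slice st.2 (some 0) (some p.1),
             PySem.Str.slice st.2 (some p.1) none)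
          else st
        if p.2 > 0 then (st1.1, PySem.Str.slice st1.2 (some p.2) none) else st1)
      (fm, sm)).1
    = PySem.Str.join ""
        (((ps.foldl
            (fun (st : List (Int × Int) × Int) tk =>
              ((if tk.1 > 0 then st.1 ++ [(st.2, st.2 + tk.1)] else st.1),
               st.2 + max tk.1 0 + max tk.2 0))
            ([], 0)).1).map (fun ab => PySem.Str.slice s (some ab.1) (some ab.2))) := by
  have h1' : fm = PySem.Str.join ""
      (([] : List (Int × Int)).map (fun ab => PySem.Str.slice s (some ab.1) (some ab.2))) := by
    rw [h1]; rfl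
  have h2' : sm = PySem.Str.slice s (some 0) none := by
    rw [h2]
    apply String.toList_inj.mp
    simp [PySem.Str.toList_slice, PySem.Chars.slice_eq_listSlice,
      PySem.List.slice_zero_start, PySem.List.slice_none_none]
  rw [h1', h2']
  exact pv_loop_eq s ps [] 0 le_rfl

-- ===== VERDICT (by name: the statement is the Claim_ definition above) =====
theorem find_the_message_spec : Claim_equal_find_the_message := by
  intro cm tl sl _ hpre
  unfold Spec_find_the_message find_the_message find_the_message_alt
  refine Eq.trans (congrArg Prod.fst
    (pv_fold_range_eq_fold_zip
      (fun (st : String × String) (t k : Int) =>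
        let st1 := if t > 0 then
            (st.1 ++ PySem.Str.slice st.2 (some 0) (some t), PySem.Str.slice st.2 (some t) none)
          else st
        if k > 0 then (st1.1, PySem.Str.slice st1.2 (some k) none) else st1)
      tl sl hpre tl.length 0 ("", PySem.Str.join "" cm) (by omega) (by omega))) ?_
  simp only [List.drop_zero]
  exact pv_loop_eq' (PySem.Str.join "" cm) (tl.zip sl) "" (PySem.Str.join "" cm) rfl rfl
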